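-- pv_equiv track=rewrite | github.com/hectorastrom/one-click-compress | src/scanner.py | _classify_architecture
-- ===== SOURCE A (Python) =====
-- def _classify_architecture(type_counts: dict[str, int]) -> str:
--     """Heuristic to classify model architecture based on layer types."""
--     conv_layers = sum(v for k, v in type_counts.items() if "Conv" in k)
--     linear_layers = type_counts.get("Linear", 0)
--     attention_layers = sum(
--         v for k, v in type_counts.items()
--         if "Attention" in k or "MultiheadAttention" in k
--     )
--     norm_layers = sum(v for k, v in type_counts.items() if "Norm" in k)
--
--     if attention_layers > 0 or (linear_layers > conv_layers and norm_layers > 2):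
--         return "transformer"
--     elif conv_layers > 0 and conv_layers >= linear_layers:
--         return "cnn"
--     elif conv_layers > 0 and linear_layers > 0:
--         return "mixed"
--     else:
--         return "unknown"
-- ===== SOURCE B (Python) =====
-- def _classify_architecture(type_counts: dict[str, int]) -> str:
--     """Heuristic to classify model architecture based on layer types."""
--     conv_layers = attention_layers = norm_layers = 0
--     for k, v in type_counts.items():
--         if "Conv" in k:
--             conv_layers += v
--         if "Attention" in k:  # "MultiheadAttention" already contains "Attention"
--             attention_layers += v
--         if "Norm" in k:
--             norm_layers += v
--     linear_layers = type_counts.get("Linear", 0)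
--
--     if attention_layers > 0 or (linear_layers > conv_layers and norm_layers > 2):
--         return "transformer"
--     elif conv_layers > 0 and conv_layers >= linear_layers:
--         return "cnn"
--     elif conv_layers > 0 and linear_layers > 0:
--         return "mixed"
--     else:
--         return "unknown"
-- ===== Notes on version B (the rewrite author's own statement) =====
-- stated objective: simpler
-- what changed: Replaces A's three separate generator-sum scans over the dict with one loop accumulating conv/attention/norm counters (independent ifs), and drops the redundant 'MultiheadAttention' substring test subsumed by 'Attention'.
import Mathlib
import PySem

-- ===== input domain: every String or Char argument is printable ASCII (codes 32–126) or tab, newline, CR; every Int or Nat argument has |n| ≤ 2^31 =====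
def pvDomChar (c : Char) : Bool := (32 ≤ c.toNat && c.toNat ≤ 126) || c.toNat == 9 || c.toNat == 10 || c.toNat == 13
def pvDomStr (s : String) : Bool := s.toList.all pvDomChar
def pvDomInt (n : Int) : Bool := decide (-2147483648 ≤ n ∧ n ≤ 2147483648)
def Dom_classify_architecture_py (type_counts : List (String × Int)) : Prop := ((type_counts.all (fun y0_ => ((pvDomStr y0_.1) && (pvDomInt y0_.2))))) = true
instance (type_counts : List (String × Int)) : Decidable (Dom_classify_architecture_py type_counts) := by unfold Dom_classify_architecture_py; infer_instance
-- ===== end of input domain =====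

-- B replaces A's three separate scans with one accumulating loop (and drops a redundant substring test); objective: simpler, same cost.
-- ===== PORT A =====
-- A: three separate generator-sum scans + a dict .get for "Linear", then the if/elif ladder.
def classify_architecture_py (type_counts : List (String × Int)) : String :=
  let conv_layers := type_counts.foldl
    (fun acc p => if PySem.Str.isIn "Conv" p.1 then acc + p.2 else acc) 0
  let linear_layers := (PySem.Dict.mk type_counts).getD "Linear" 0
  let attention_layers := type_counts.foldl
    (fun acc p => if PySem.Str.isIn "Attention" p.1 || PySem.Str.isIn "MultiheadAttention" p.1
                  then acc + p.2 else acc) 0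
  let norm_layers := type_counts.foldl
    (fun acc p => if PySem.Str.isIn "Norm" p.1 then acc + p.2 else acc) 0
  if attention_layers > 0 || (linear_layers > conv_layers && norm_layers > 2) then "transformer"
  else if conv_layers > 0 && conv_layers ≥ linear_layers then "cnn"
  else if conv_layers > 0 && linear_layers > 0 then "mixed"
  else "unknown"

-- ===== PORT B =====
-- B: one loop over items() accumulating the three counters with independent ifs.
def classify_architecture_py_alt (type_counts : List (String × Int)) : String :=
  let acc := type_counts.foldl
    (fun (acc : Int × Int × Int) p =>
      let acc := if PySem.Str.isIn "Conv" p.1 then (acc.1 + p.2, acc.2.1, acc.2.2) else acc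
      let acc := if PySem.Str.isIn "Attention" p.1 then (acc.1, acc.2.1 + p.2, acc.2.2) else acc
      if PySem.Str.isIn "Norm" p.1 then (acc.1, acc.2.1, acc.2.2 + p.2) else acc)
    (0, 0, 0)
  let conv_layers := acc.1
  let attention_layers := acc.2.1
  let norm_layers := acc.2.2
  let linear_layers := (PySem.Dict.mk type_counts).getD "Linear" 0
  if attention_layers > 0 || (linear_layers > conv_layers && norm_layers > 2) then "transformer"
  else if conv_layers > 0 && conv_layers ≥ linear_layers then "cnn"
  else if conv_layers > 0 && linear_layers > 0 then "mixed"
  else "unknown"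

-- ===== PRECONDITION & SPEC =====
def Spec_classify_architecture_py (type_counts : List (String × Int)) (out : String) : Prop := out = classify_architecture_py_alt type_counts
instance (type_counts : List (String × Int)) (out : String) : Decidable (Spec_classify_architecture_py type_counts out) := by unfold Spec_classify_architecture_py; infer_instance

-- ===== CLAIM (what is proved, stated in full; the proofs are below) =====
def Claim_equal_classify_architecture_py : Prop := ∀ (type_counts : List (String × Int)), Dom_classify_architecture_py type_counts → Spec_classify_architecture_py type_counts (classify_architecture_py type_counts)

-- ===== LEMMAS AND PROOFS =====

-- "MultiheadAttention" ⊆ k already implies "Attention" ⊆ k, so A's disjunction collapses.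
theorem attn_cond (k : String) :
    (PySem.Str.isIn "Attention" k || PySem.Str.isIn "MultiheadAttention" k)
      = PySem.Str.isIn "Attention" k := by
  cases h : PySem.Str.isIn "Attention" k
  · simp only [Bool.false_or]
    by_contra hm
    rw [Bool.not_eq_false, PySem.Str.isIn_iff_infix] at hm
    rw [Bool.eq_false_iff, Ne, PySem.Str.isIn_iff_infix] at h
    exact h (List.IsInfix.trans (by decide) hm)
  · simp

theorem foldB_eq (tc : List (String × Int)) : ∀ (acc : Int × Int × Int),
    tc.foldl
      (fun (acc : Int × Int × Int) p =>
        let acc := if PySem.Str.isIn "Conv" p.1 then (acc.1 + p.2, acc.2.1, acc.2.2) else acc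
        let acc := if PySem.Str.isIn "Attention" p.1 then (acc.1, acc.2.1 + p.2, acc.2.2) else acc
        if PySem.Str.isIn "Norm" p.1 then (acc.1, acc.2.1, acc.2.2 + p.2) else acc)
      acc
    = (tc.foldl (fun acc p => if PySem.Str.isIn "Conv" p.1 then acc + p.2 else acc) acc.1,
       tc.foldl (fun acc p => if PySem.Str.isIn "Attention" p.1 || PySem.Str.isIn "MultiheadAttention" p.1
                              then acc + p.2 else acc) acc.2.1,
       tc.foldl (fun acc p => if PySem.Str.isIn "Norm" p.1 then acc + p.2 else acc) acc.2.2) := by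
  induction tc with
  | nil => intro acc; rfl
  | cons p tl ih =>
    intro acc
    simp only [List.foldl_cons]
    rw [ih]
    simp only [attn_cond, Prod.mk.injEq]
    refine ⟨?_, ?_, ?_⟩ <;> (congr 1; split_ifs <;> rfl)

-- ===== VERDICT (by name: the statement is the Claim_ definition above) =====
theorem classify_architecture_py_spec : Claim_equal_classify_architecture_py := by
  intro tc _
  unfold Spec_classify_architecture_py classify_architecture_py classify_architecture_py_alt
  rw [foldB_eq]
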